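-- pv_equiv track=rewrite | github.com/AnonyKR/SplendorAI | splendor/display.py | nth_value
-- ===== SOURCE A (Python) =====
-- def nth_value(list_in, occurence): #find n-th non 0 value of the list (assume list containes ints & have that value)
--     if occurence <= 0:
--         return (-1,-1)
--     c = 0
--     for x in range(0,len(list_in)):
--         if list_in[x] != 0:
--             c += 1
--             if c == occurence:
--                 return (x, list_in[x])
--     return (-1,-1)
-- ===== SOURCE B (Python) =====
-- def nth_value(list_in, occurence):
--     if occurence <= 0:
--         return (-1, -1)
--     hits = [(i, v) for i, v in enumerate(list_in) if v != 0]
--     if occurence <= len(hits):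
--         return hits[occurence - 1]
--     return (-1, -1)
-- ===== Notes on version B (the rewrite author's own statement) =====
-- stated objective: simpler
-- what changed: Replaces the counting loop with early return by a two-phase 'collect then index' decomposition: build the table of (index, value) pairs of non-zero entries, then select entry occurence-1 positionally, with the same (-1,-1) sentinels.
import Mathlib
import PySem

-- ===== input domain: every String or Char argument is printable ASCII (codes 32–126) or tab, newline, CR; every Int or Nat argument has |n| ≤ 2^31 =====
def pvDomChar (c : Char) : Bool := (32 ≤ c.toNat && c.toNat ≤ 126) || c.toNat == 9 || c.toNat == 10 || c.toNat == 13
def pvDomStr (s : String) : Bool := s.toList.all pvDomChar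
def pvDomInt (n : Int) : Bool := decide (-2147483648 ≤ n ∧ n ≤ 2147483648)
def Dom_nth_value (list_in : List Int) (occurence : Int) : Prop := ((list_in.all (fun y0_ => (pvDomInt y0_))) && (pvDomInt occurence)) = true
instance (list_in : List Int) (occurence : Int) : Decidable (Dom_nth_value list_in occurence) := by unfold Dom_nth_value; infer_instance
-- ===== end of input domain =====

-- B replaces A's counting loop with early return by a 'collect non-zero (index, value) pairs, then index positionally' decomposition (objective: simpler).


-- ===== PORT A =====
-- the for-loop over range(0, len(list_in)) with running counter c and early return;
-- x tracks the current index, the list argument is the remaining suffix (list_in[x] is its head)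
def nthGo (occurence : Int) : List Int → Int → Int → Int × Int
  | [], _, _ => (-1, -1)
  | v :: rest, x, c =>
    if v ≠ 0 then
      if c + 1 = occurence then (x, v) else nthGo occurence rest (x + 1) (c + 1)
    else nthGo occurence rest (x + 1) c

def nth_value (list_in : List Int) (occurence : Int) : Int × Int :=
  if occurence ≤ 0 then (-1, -1) else nthGo occurence list_in 0 0

-- ===== PORT B =====
def nth_value_alt (list_in : List Int) (occurence : Int) : Int × Int :=
  if occurence ≤ 0 then (-1, -1)
  else
    let hits := (PySem.List.enumerate list_in 0).filter (fun p => p.2 ≠ 0)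
    if occurence ≤ (hits.length : Int) then
      (PySem.List.pyGet? hits (occurence - 1)).getD (-1, -1)
    else (-1, -1)

-- ===== PRECONDITION & SPEC =====
def Spec_nth_value (list_in : List Int) (occurence : Int) (out : Int × Int) : Prop := out = nth_value_alt list_in occurence
instance (list_in : List Int) (occurence : Int) (out : Int × Int) : Decidable (Spec_nth_value list_in occurence out) := by unfold Spec_nth_value; infer_instance

-- ===== CLAIM (what is proved, stated in full; the proofs are below) =====
def Claim_equal_nth_value : Prop := ∀ (list_in : List Int) (occurence : Int), Dom_nth_value list_in occurence → Spec_nth_value list_in occurence (nth_value list_in occurence)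

-- ===== LEMMAS AND PROOFS =====

theorem pyGet?_cons_pos {α : Type} (a : α) (t : List α) (i : Int) (h : 1 ≤ i) :
    PySem.List.pyGet? (a :: t) i = PySem.List.pyGet? t (i - 1) := by
  rw [PySem.List.pyGet?_of_nonneg (a :: t) (show (0:Int) ≤ i by omega),
      PySem.List.pyGet?_of_nonneg t (show (0:Int) ≤ i - 1 by omega)]
  have h2 : i.toNat = (i - 1).toNat + 1 := by omega
  rw [h2]
  simp

theorem nthGo_eq (occurence : Int) (l : List Int) : ∀ (x c : Int), c < occurence →
    nthGo occurence l x c =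
      (let h := (PySem.List.enumerate l x).filter (fun p => p.2 ≠ 0)
       if occurence - c ≤ (h.length : Int) then
         (PySem.List.pyGet? h (occurence - c - 1)).getD (-1, -1)
       else (-1, -1)) := by
  induction l with
  | nil =>
    intro x c hc
    simp [nthGo, PySem.List.enumerate]
    omega
  | cons v rest ih =>
    intro x c hc
    rw [PySem.List.enumerate_cons]
    by_cases hv : v = 0
    · simp only [nthGo, hv, List.filter_cons]
      simpa using ih (x + 1) c hc
    · simp only [nthGo, List.filter_cons, if_pos (by simp [hv] : (decide ¬(v = 0)) = true)]
      by_cases heq : c + 1 = occurence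
      · have h1 : occurence - c = 1 := by omega
        simp [heq, h1]
        omega
      · have hlt : c + 1 < occurence := by omega
        simp only [if_neg heq]
        rw [ih (x + 1) (c + 1) hlt]
        rw [pyGet?_cons_pos _ _ _ (by omega)]
        have hidx : occurence - c - 1 - 1 = occurence - (c + 1) - 1 := by ring
        rw [hidx]
        simp only [List.length_cons]
        split_ifs with h1 h2 h3 <;> first | rfl | (exfalso; push_cast at *; omega)

-- ===== VERDICT (by name: the statement is the Claim_ definition above) =====
theorem nth_value_spec : Claim_equal_nth_value := by
  intro list_in occurence _
  unfold Spec_nth_value nth_value nth_value_alt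
  by_cases h : occurence ≤ 0
  · simp [h]
  · rw [if_neg h, if_neg h, nthGo_eq occurence list_in 0 0 (by omega)]
    simp
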